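-- pv_equiv track=rewrite | github.com/irupawala/Ibrahim-List | Ibrahim Personal/Pure Storage/Onsite/Codes/[7] BitMap/1D Array/Stress test.py | set_bit
-- ===== SOURCE A (Python) =====
-- def setbit_down(A, x, n):
--     if x>=n:
--         return
--     if 2*x+1<=n and A[2*x+1]==0:
--         A[2*x+1]=1
--         setbit_down(A,2*x+1,n)
--     if 2*x+2<=n and A[2*x+2]==0:
--         A[2*x+2]=1
--         setbit_down(A,2*x+2,n)
--
-- def set_bit(A, pos, length):
--     if not A or pos<0 or length<=0:
--         return
--     n = len(A)-1    #last index of A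
--     for x in range(pos, min(n+1,min(pos+length, 2*pos+1))):
--         # set self
--         if A[x] == 1:
--             continue
--         A[x]=1
--         # set descendants
--         setbit_down(A,x,n)
--         # set ancestors
--         while x>0:
--             # make sure its sibling is 1, if its sibling is 0, cannot set ancestors
--             if (x%2==0 and A[x-1]==1) or (x%2==1 and x<n and A[x+1]==1):
--                 A[int((x-1)/2)] = 1
--             x = int((x-1)/2)
--
--     return A
-- ===== SOURCE B (Python) =====
-- def _fill_down(A, x, n):
--     # iterative preorder over still-zero descendants: explicit stack of nodes to examine
--     pending = [2 * x + 2, 2 * x + 1] if x < n else []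
--     while pending:
--         c = pending.pop()
--         if c <= n and A[c] == 0:
--             A[c] = 1
--             if c < n:
--                 pending.append(2 * c + 2)
--                 pending.append(2 * c + 1)
--
-- def _raise_up(A, x, n):
--     while x > 0:
--         if (x % 2 == 0 and A[x - 1] == 1) or (x % 2 == 1 and x < n and A[x + 1] == 1):
--             A[(x - 1) // 2] = 1
--         x = (x - 1) // 2
--
-- def set_bit(A, pos, length):
--     if not A or pos < 0 or length <= 0:
--         return
--     n = len(A) - 1
--     for x in range(pos, min(n + 1, pos + length, 2 * pos + 1)):
--         if A[x] != 1:
--             A[x] = 1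
--             _fill_down(A, x, n)
--             _raise_up(A, x, n)
--     return A
-- ===== Notes on version B (the rewrite author's own statement) =====
-- stated objective: alternative
-- what changed: The recursive setbit_down descendant fill is replaced by an iterative explicit-stack preorder fill, and the function is decomposed into _fill_down/_raise_up helpers instead of one monolithic loop body with a recursive helper.
import Mathlib
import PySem

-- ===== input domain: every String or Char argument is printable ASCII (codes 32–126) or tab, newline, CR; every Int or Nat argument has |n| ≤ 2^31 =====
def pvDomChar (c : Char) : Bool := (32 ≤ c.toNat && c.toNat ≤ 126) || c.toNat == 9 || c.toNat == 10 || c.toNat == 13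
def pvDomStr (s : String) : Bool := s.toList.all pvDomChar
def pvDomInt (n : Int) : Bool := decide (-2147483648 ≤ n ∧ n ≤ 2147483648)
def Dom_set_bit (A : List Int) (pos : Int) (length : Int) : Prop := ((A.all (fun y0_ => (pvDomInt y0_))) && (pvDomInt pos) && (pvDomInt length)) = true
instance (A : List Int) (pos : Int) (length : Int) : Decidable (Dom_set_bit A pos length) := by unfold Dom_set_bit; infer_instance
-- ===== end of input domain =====

-- B replaces A's recursive descendant fill by an explicit-stack iterative fill and splits the body
-- into two helpers (different decomposition, same cost). Both Pythons mutate A in place and return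
-- the same object; the equivalence proved here is about the RETURN value.

-- ===== PORT A =====
-- A[i] for 0 ≤ i < len(A): every index reached by these programs is in range (x ≤ n = len-1,
-- guarded child/sibling indices), so getD is exact there.
def pgetA (A : List Int) (i : Int) : Int := A.getD i.toNat 0

-- termination facts for A's helpers, cited by their decreasing_by (term proofs only)
theorem sbDec1 (x n : Nat) (h : ¬ x ≥ n) : n - (2*x+1) < n - x :=
  Nat.sub_lt_sub_left (Nat.lt_of_not_le h)
    (Nat.lt_succ_of_le ((two_mul x).symm ▸ Nat.le_add_left x x))
theorem sbDec2 (x n : Nat) (h : ¬ x ≥ n) : n - (2*x+2) < n - x :=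
  Nat.sub_lt_sub_left (Nat.lt_of_not_le h)
    (Nat.lt_succ_of_le (Nat.le_succ_of_le ((two_mul x).symm ▸ Nat.le_add_left x x)))
theorem ancDec (x : Nat) (h : x > 0) : (x-1)/2 < x :=
  Nat.lt_of_le_of_lt (Nat.div_le_self _ _) (Nat.sub_lt h Nat.one_pos)

-- A's recursive setbit_down. Indices are ints that are provably ≥ 0 at every call site
-- (x ≥ pos ≥ 0, n = len-1 ≥ 0), so they are carried as Nat here; otherwise step for step.
def setbitDown (A : List Int) (x n : Nat) : List Int :=
  if x ≥ n then A
  else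
    let A1 := if 2*x+1 ≤ n ∧ A.getD (2*x+1) 0 = 0
      then setbitDown (A.set (2*x+1) 1) (2*x+1) n else A
    if 2*x+2 ≤ n ∧ A1.getD (2*x+2) 0 = 0
      then setbitDown (A1.set (2*x+2) 1) (2*x+2) n else A1
termination_by n - x
decreasing_by
  · exact sbDec1 x n ‹¬ x ≥ n›
  · exact sbDec2 x n ‹¬ x ≥ n›

-- A's ancestor while-loop.  x > 0 inside the loop and n ≥ 0, so both are carried as Nat;
-- int((x-1)/2) is truncating division of nonnegative ints = Nat division (float division is
-- exact for |x| ≤ 2^31 < 2^53); x % 2 with x ≥ 0 is Nat %.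
def ancLoopA (A : List Int) (x n : Nat) : List Int :=
  if h : x > 0 then
    let A' := if (x % 2 = 0 ∧ A.getD (x-1) 0 = 1) ∨ (x % 2 = 1 ∧ x < n ∧ A.getD (x+1) 0 = 1)
      then A.set ((x-1)/2) 1 else A
    ancLoopA A' ((x-1)/2) n
  else A
termination_by x
decreasing_by exact ancDec x h

-- port of A's set_bit: guard, n = len-1, fold over range(pos, min(n+1, min(pos+length, 2*pos+1)));
-- every x drawn from the range satisfies 0 ≤ pos ≤ x ≤ n, so x.toNat is exact.
def set_bit (A : List Int) (pos : Int) (length : Int) : Option (List Int) :=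
  if A = [] ∨ pos < 0 ∨ length ≤ 0 then none
  else
    let n : Int := (A.length : Int) - 1
    some ((PySem.List.pyRange pos (min (n+1) (min (pos+length) (2*pos+1))) 1).foldl
      (fun B x =>
        if pgetA B x = 1 then B
        else
          -- A[x]=1; setbit_down(A,x,n); ancestor climb (inline in A's Python)
          ancLoopA (setbitDown (B.set x.toNat 1) x.toNat (A.length - 1)) x.toNat (A.length - 1)) A)

-- ===== PORT B =====
def pgetB (A : List Int) (i : Int) : Int := A.getD i.toNat 0

-- termination facts for B's helpers, cited by their decreasing_by (term proofs only)
theorem stkDec1 (n c : Nat) (rest : List Nat) (h : c < n) :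
    (((2*c+1) :: (2*c+2) :: rest).map (fun c => 3^(n+1-c))).sum
      < ((c :: rest).map (fun c => 3^(n+1-c))).sum := by
  have hc2 : c ≤ 2*c := (two_mul c).symm ▸ Nat.le_add_left c c
  have hP : 0 < (3:Nat)^(n-c) := Nat.pow_pos (by decide)
  have h1 : (3:Nat)^(n+1-(2*c+1)) ≤ 3^(n-c) := by
    rw [show n+1-(2*c+1) = n - 2*c from Nat.succ_sub_succ n (2*c)]
    exact Nat.pow_le_pow_right (by decide) (Nat.sub_le_sub_left hc2 n)
  have h2 : (3:Nat)^(n+1-(2*c+2)) ≤ 3^(n-c) := by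
    rw [show n+1-(2*c+2) = n - (2*c+1) from Nat.succ_sub_succ n (2*c+1)]
    exact Nat.pow_le_pow_right (by decide)
      (Nat.sub_le_sub_left (Nat.le_succ_of_le hc2) n)
  have epow : (3:Nat)^(n+1-c) = 3 * 3^(n-c) := by
    rw [show n+1-c = (n-c)+1 from Nat.succ_sub (Nat.le_of_lt h), pow_succ, Nat.mul_comm]
  simp only [List.map_cons, List.sum_cons, epow]
  calc 3^(n+1-(2*c+1)) + (3^(n+1-(2*c+2)) + (rest.map (fun c => 3^(n+1-c))).sum)
      ≤ 3^(n-c) + (3^(n-c) + (rest.map (fun c => 3^(n+1-c))).sum) :=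
        Nat.add_le_add h1 (Nat.add_le_add_right h2 _)
    _ = 2*3^(n-c) + (rest.map (fun c => 3^(n+1-c))).sum := by
        rw [← Nat.add_assoc, ← Nat.two_mul]
    _ < 3*3^(n-c) + (rest.map (fun c => 3^(n+1-c))).sum :=
        Nat.add_lt_add_right ((Nat.mul_lt_mul_right hP).mpr (by decide)) _
theorem stkDec2 (n c : Nat) (rest : List Nat) :
    (rest.map (fun c => 3^(n+1-c))).sum < ((c :: rest).map (fun c => 3^(n+1-c))).sum := by
  simp only [List.map_cons, List.sum_cons]
  exact Nat.lt_add_of_pos_left (Nat.pow_pos (by decide))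

-- B's _fill_down: explicit stack of nodes still to examine.  The Lean list holds the TOP of the
-- Python stack (append/pop at the end) at its HEAD, so push 2c+2 then 2c+1 becomes 2c+1 :: 2c+2 :: rest.
def fillDown (A : List Int) (pending : List Nat) (n : Nat) : List Int :=
  match pending with
  | [] => A
  | c :: rest =>
    if c ≤ n ∧ A.getD c 0 = 0 then
      if c < n then fillDown (A.set c 1) ((2*c+1) :: (2*c+2) :: rest) n
      else fillDown (A.set c 1) rest n
    else fillDown A rest n
termination_by (pending.map (fun c => 3^(n+1-c))).sum
decreasing_by
  · exact stkDec1 n c rest ‹c < n›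
  · exact stkDec2 n c rest
  · exact stkDec2 n c rest

-- B's _raise_up helper: same while loop; x > 0 and n ≥ 0 carried as Nat, (x-1)//2 on
-- nonnegative ints = Nat division, x % 2 for x ≥ 0 = Nat %.
def raiseUp (A : List Int) (x n : Nat) : List Int :=
  if h : x > 0 then
    let A' := if (x % 2 = 0 ∧ A.getD (x-1) 0 = 1) ∨ (x % 2 = 1 ∧ x < n ∧ A.getD (x+1) 0 = 1)
      then A.set ((x-1)/2) 1 else A
    raiseUp A' ((x-1)/2) n
  else A
termination_by x
decreasing_by exact ancDec x h

def set_bit_alt (A : List Int) (pos : Int) (length : Int) : Option (List Int) :=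
  if A = [] ∨ pos < 0 ∨ length ≤ 0 then none
  else
    let n : Int := (A.length : Int) - 1
    some ((PySem.List.pyRange pos (min (n+1) (min (pos+length) (2*pos+1))) 1).foldl
      (fun B x =>
        if pgetB B x ≠ 1 then
          -- A[x]=1; _fill_down(A,x,n); _raise_up(A,x,n)
          raiseUp (fillDown (B.set x.toNat 1)
                    (if x.toNat < A.length - 1 then [2*x.toNat+1, 2*x.toNat+2] else [])
                    (A.length - 1)) x.toNat (A.length - 1)
        else B) A)

-- ===== PRECONDITION & SPEC =====
def Spec_set_bit (A : List Int) (pos : Int) (length : Int) (out : Option (List Int)) : Prop := out = set_bit_alt A pos length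
instance (A : List Int) (pos : Int) (length : Int) (out : Option (List Int)) : Decidable (Spec_set_bit A pos length out) := by unfold Spec_set_bit; infer_instance

-- ===== CLAIM (what is proved, stated in full; the proofs are below) =====
def Claim_equal_set_bit : Prop := ∀ (A : List Int) (pos : Int) (length : Int), Dom_set_bit A pos length → Spec_set_bit A pos length (set_bit A pos length)

-- ===== LEMMAS AND PROOFS =====

-- one fully processed stack entry, expressed through A's recursive fill
def fillStep (A : List Int) (c n : Nat) : List Int :=
  if c ≤ n ∧ A.getD c 0 = 0 then setbitDown (A.set c 1) c n else A

theorem fill_step (n : Nat) : ∀ (k : Nat) (c : Nat) (rest : List Nat) (A : List Int),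
    ((c :: rest).map (fun c => 3^(n+1-c))).sum ≤ k →
    fillDown A (c :: rest) n = fillDown (fillStep A c n) rest n := by
  intro k
  induction k with
  | zero =>
    intro c rest A hk
    exfalso
    have : 0 < (3:Nat)^(n+1-c) := Nat.pow_pos (by omega)
    simp only [List.map_cons, List.sum_cons] at hk; omega
  | succ k ih =>
    intro c rest A hk
    simp only [List.map_cons, List.sum_cons] at hk
    rw [fillDown, fillStep]
    by_cases hc : c ≤ n ∧ A.getD c 0 = 0
    · simp only [if_pos hc]
      by_cases hlt : c < n
      · simp only [if_pos hlt]
        have hpow : (3:Nat)^(n+1-c) = 3 * 3^(n-c) := by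
          have : n+1-c = (n-c)+1 := by omega
          rw [this, pow_succ]; ring
        have h1 : 3^(n+1-(2*c+1)) ≤ 3^(n-c) := Nat.pow_le_pow_right (by omega) (by omega)
        have h2 : 3^(n+1-(2*c+2)) ≤ 3^(n-c) := Nat.pow_le_pow_right (by omega) (by omega)
        have hp : 0 < (3:Nat)^(n-c) := Nat.pow_pos (by omega)
        rw [ih (2*c+1) ((2*c+2) :: rest) _ (by simp only [List.map_cons, List.sum_cons]; omega)]
        rw [ih (2*c+2) rest _ (by simp only [List.map_cons, List.sum_cons]; omega)]
        -- the two fillSteps compose to A's setbitDown on the freshly set node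
        rw [setbitDown]
        simp only [if_neg (by omega : ¬ c ≥ n)]
        simp only [fillStep]
      · simp only [if_neg hlt]
        have hcn : c = n := by omega
        rw [setbitDown]
        simp only [hcn, if_pos (le_refl n)]
    · simp only [if_neg hc]

-- B's stack fill (with its conditional initial stack) equals A's recursive fill
theorem inner_eq (A : List Int) (x n : Nat) :
    fillDown A (if x < n then [2*x+1, 2*x+2] else []) n = setbitDown A x n := by
  by_cases h : x < n
  · simp only [if_pos h]
    rw [fill_step n ((((2*x+1) : Nat) :: [2*x+2]).map (fun c => 3^(n+1-c))).sum (2*x+1) [2*x+2] A le_rfl]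
    rw [fill_step n ((((2*x+2) : Nat) :: ([] : List Nat)).map (fun c => 3^(n+1-c))).sum (2*x+2) [] _ le_rfl]
    rw [fillDown, setbitDown]
    simp only [if_neg (by omega : ¬ x ≥ n)]
    simp only [fillStep]
  · simp only [if_neg h]
    rw [fillDown, setbitDown]
    simp only [if_pos (by omega : x ≥ n)]

-- the two ancestor climbs are the same loop
theorem anc_eq_aux : ∀ (m : Nat) (A : List Int) (x n : Nat), x ≤ m →
    ancLoopA A x n = raiseUp A x n := by
  intro m
  induction m with
  | zero =>
    intro A x n hm
    rw [ancLoopA, raiseUp]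
    simp only [dif_neg (by omega : ¬ x > 0)]
  | succ m ih =>
    intro A x n hm
    by_cases hx : x > 0
    · rw [ancLoopA, raiseUp]
      simp only [dif_pos hx]
      exact ih _ _ _ (by have := ancDec x hx; omega)
    · rw [ancLoopA, raiseUp]
      simp only [dif_neg hx]

theorem anc_eq (A : List Int) (x n : Nat) : ancLoopA A x n = raiseUp A x n :=
  anc_eq_aux x A x n le_rfl

theorem body_eq (A : List Int) :
    (fun (B : List Int) (x : Int) =>
        if pgetA B x = 1 then B
        else ancLoopA (setbitDown (B.set x.toNat 1) x.toNat (A.length - 1)) x.toNat (A.length - 1))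
    = (fun (B : List Int) (x : Int) =>
        if pgetB B x ≠ 1 then
          raiseUp (fillDown (B.set x.toNat 1)
                    (if x.toNat < A.length - 1 then [2*x.toNat+1, 2*x.toNat+2] else [])
                    (A.length - 1)) x.toNat (A.length - 1)
        else B) := by
  funext B x
  by_cases h : pgetA B x = 1
  · simp [h, show pgetB B x = 1 from h]
  · simp only [if_neg h, ne_eq, if_pos (show ¬ pgetB B x = 1 from h)]
    rw [inner_eq, anc_eq]

-- ===== VERDICT (by name: the statement is the Claim_ definition above) =====
theorem set_bit_spec : Claim_equal_set_bit := by
  intro A pos length _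
  unfold Spec_set_bit set_bit set_bit_alt
  by_cases hg : A = [] ∨ pos < 0 ∨ length ≤ 0
  · simp [hg]
  · simp only [if_neg hg]
    rw [body_eq A]
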